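-- pv_equiv track=rewrite | github.com/anoldKupara/Advanced_AI_and_Expert_Systems | Question1.py | diagnose
-- ===== SOURCE A (Python) =====
-- knowledge_base = {
--     "malaria": ["fever", "chills", "sweating", "headache", "muscle pain", "nausea", "vomiting"],
--     "migraine": ["severe headache", "nausea", "sensitivity to light", "blurred vision"],
--     "lupus": ["fatigue", "joint pain", "rash", "fever", "hair loss", "sun sensitivity"],
--     "flu": ["fever", "cough", "body aches", "fatigue", "sore throat", "runny nose"],
--     "typhoid": ["fever", "weakness", "abdominal pain", "constipation", "rash", "headache"]
-- }
--
-- def diagnose(symptoms_input):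
--     diagnosis_score = {}
--
--     for disease, symptoms in knowledge_base.items():
--         match_count = sum(1 for symptom in symptoms_input if symptom in symptoms)
--         diagnosis_score[disease] = match_count
--
--     max_match = max(diagnosis_score.values())
--
--     if max_match > 1:
--         best_matches = [disease for disease, score in diagnosis_score.items() if score == max_match]
--         return best_matches, max_match
--     else:
--         return [], 0
-- ===== SOURCE B (Python) =====
-- knowledge_base = {
--     "malaria": ["fever", "chills", "sweating", "headache", "muscle pain", "nausea", "vomiting"],
--     "migraine": ["severe headache", "nausea", "sensitivity to light", "blurred vision"],
--     "lupus": ["fatigue", "joint pain", "rash", "fever", "hair loss", "sun sensitivity"],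
--     "flu": ["fever", "cough", "body aches", "fatigue", "sore throat", "runny nose"],
--     "typhoid": ["fever", "weakness", "abdominal pain", "constipation", "rash", "headache"]
-- }
--
-- def diagnose(symptoms_input):
--     # Single running-best pass: no score dict, no separate max/filter passes.
--     # Each disease's score is the sum of input occurrence counts of its own
--     # symptoms (equal to A's membership count because symptom lists have no
--     # duplicates); a running (best_list, max) pair replaces A's dict + max +
--     # filter stages.
--     best, max_match = [], 0
--     for disease, symptoms in knowledge_base.items():
--         score = 0
--         for s in symptoms:
--             score += symptoms_input.count(s)
--         if score > max_match:
--             best, max_match = [disease], score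
--         elif score == max_match:
--             best = best + [disease]
--     if max_match > 1:
--         return best, max_match
--     return [], 0
-- ===== Notes on version B (the rewrite author's own statement) =====
-- stated objective: alternative
-- what changed: B replaces A's score-dict + max-over-values + filter pipeline by a single running-best pass keeping a (best_list, max) pair, scoring each disease by summing symptoms_input.count over its own symptom list instead of scanning the input per disease.
import Mathlib
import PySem

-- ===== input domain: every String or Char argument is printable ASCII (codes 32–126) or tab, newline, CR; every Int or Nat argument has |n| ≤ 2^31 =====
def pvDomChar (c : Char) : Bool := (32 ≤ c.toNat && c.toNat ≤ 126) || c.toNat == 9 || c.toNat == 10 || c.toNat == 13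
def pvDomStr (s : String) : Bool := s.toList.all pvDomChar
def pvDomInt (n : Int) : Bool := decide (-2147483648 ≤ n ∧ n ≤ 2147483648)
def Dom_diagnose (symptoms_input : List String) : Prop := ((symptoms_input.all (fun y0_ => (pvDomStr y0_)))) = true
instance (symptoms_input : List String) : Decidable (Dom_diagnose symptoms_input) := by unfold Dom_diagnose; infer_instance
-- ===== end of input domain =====

-- B replaces A's dict-of-scores + max + filter stages by one running-best pass that keeps (best list, max) as it goes, scoring each disease by summing input occurrence counts of its own symptoms (objective: alternative).


-- shared module-level constant (data, used by both programs)
def knowledge_base : List (String × List String) :=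
  [("malaria", ["fever", "chills", "sweating", "headache", "muscle pain", "nausea", "vomiting"]),
   ("migraine", ["severe headache", "nausea", "sensitivity to light", "blurred vision"]),
   ("lupus", ["fatigue", "joint pain", "rash", "fever", "hair loss", "sun sensitivity"]),
   ("flu", ["fever", "cough", "body aches", "fatigue", "sore throat", "runny nose"]),
   ("typhoid", ["fever", "weakness", "abdominal pain", "constipation", "rash", "headache"])]

-- ===== PORT A =====
-- literal port of A: per disease, scan symptoms_input counting members of its symptom list, into a score dict; then max over values and a filter
def diagnose (symptoms_input : List String) : List String × Int :=
  let diagnosis_score : PySem.Dict String Int :=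
    knowledge_base.foldl (fun d p =>
      d.insert p.1 (symptoms_input.foldl (fun acc s => if s ∈ p.2 then acc + 1 else acc) (0 : Int)))
      PySem.Dict.empty
  -- max(diagnosis_score.values()): the none branch is unreachable (knowledge_base is a nonempty literal)
  match PySem.List.max? diagnosis_score.values (fun x => x) with
  | none => ([], 0)
  | some max_match =>
    if max_match > 1 then
      ((diagnosis_score.items.filter (fun q => q.2 == max_match)).map (fun q => q.1), max_match)
    else ([], 0)

-- ===== PORT B =====
-- literal port of Source B: one running-best pass over knowledge_base; score = sum of input counts of the disease's symptoms
def diagnose_alt (symptoms_input : List String) : List String × Int :=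
  let st :=
    knowledge_base.foldl (fun st p =>
      let score := p.2.foldl (fun acc s => acc + (PySem.List.count symptoms_input s : Int)) (0 : Int)
      if score > st.2 then ([p.1], score)
      else if score == st.2 then (st.1 ++ [p.1], st.2)
      else st) (([], 0) : List String × Int)
  if st.2 > 1 then st else ([], 0)

-- ===== PRECONDITION & SPEC =====
def Spec_diagnose (symptoms_input : List String) (out : List String × Int) : Prop := out = diagnose_alt symptoms_input
instance (symptoms_input : List String) (out : List String × Int) : Decidable (Spec_diagnose symptoms_input out) := by unfold Spec_diagnose; infer_instance

-- ===== CLAIM (what is proved, stated in full; the proofs are below) =====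
def Claim_equal_diagnose : Prop := ∀ (symptoms_input : List String), Dom_diagnose symptoms_input → Spec_diagnose symptoms_input (diagnose symptoms_input)

-- ===== LEMMAS AND PROOFS =====

-- helpers used only by the proofs
def pvStep (st : List String × Int) (q : String × Int) : List String × Int :=
  if q.2 > st.2 then ([q.1], q.2) else if q.2 == st.2 then (st.1 ++ [q.1], st.2) else st

def pvM (ps : List (String × Int)) : Int := ps.foldl (fun m q => max m q.2) 0

theorem foldl_max_init_le (ps : List (String × Int)) (i : Int) :
    i ≤ ps.foldl (fun m q => max m q.2) i := by
  induction ps generalizing i with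
  | nil => simp
  | cons p t ih => exact le_trans (le_max_left i p.2) (ih (max i p.2))

theorem le_foldl_max_mem (ps : List (String × Int)) (i : Int) (q : String × Int) (hq : q ∈ ps) :
    q.2 ≤ ps.foldl (fun m q => max m q.2) i := by
  induction ps generalizing i with
  | nil => cases hq
  | cons p t ih =>
    rcases List.mem_cons.mp hq with rfl | h
    · exact le_trans (le_max_right i q.2) (foldl_max_init_le t (max i q.2))
    · exact ih (max i p.2) h

-- summing the indicator of x over a duplicate-free list is a membership test
theorem sum_indicator (x : String) (syms : List String) (h : syms.Nodup) :
    (syms.map (fun s => if x == s then (1 : Int) else 0)).sum = if x ∈ syms then 1 else 0 := by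
  induction syms with
  | nil => simp
  | cons y ys ih =>
    simp only [List.map_cons, List.sum_cons, ih (List.Nodup.of_cons h), List.mem_cons]
    by_cases hxy : x = y
    · subst hxy
      have hx : x ∉ ys := List.Nodup.notMem h
      simp [hx]
    · simp [hxy]

-- A's membership-count of l against a duplicate-free syms equals B's sum of per-symptom counts
theorem cnt_eq (l syms : List String) (h : syms.Nodup) :
    l.foldl (fun acc s => if s ∈ syms then acc + 1 else acc) (0 : Int)
      = syms.foldl (fun acc s => acc + (PySem.List.count l s : Int)) (0 : Int) := by
  rw [show (fun (acc : Int) s => if s ∈ syms then acc + 1 else acc)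
        = (fun (acc : Int) s => if (fun s => decide (s ∈ syms)) s = true then acc + 1 else acc) from by
      funext acc s; by_cases hs : s ∈ syms <;> simp [hs]]
  rw [PySem.List.foldl_count_if, PySem.List.foldl_add]
  simp only [PySem.List.count_eq, zero_add]
  induction l with
  | nil => simp
  | cons x t ih =>
    simp only [List.countP_cons, List.count_cons]
    push_cast
    push_cast at ih
    rw [show (fun s => ((t.count s : Int) + if x == s then (1 : Int) else 0))
          = (fun s => (fun s => ((t.count s : Nat) : Int)) s + (fun s => if x == s then (1 : Int) else 0) s) from rfl]
    rw [List.sum_map_add, ← ih, sum_indicator x syms h]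
    by_cases hx : x ∈ syms <;> simp [hx]

-- B's running-best fold computes (first-to-last diseases achieving the max, the max)
theorem fold_best (ps : List (String × Int)) :
    ps.foldl pvStep ([], 0) = ((ps.filter (fun q => q.2 == pvM ps)).map Prod.fst, pvM ps) := by
  induction ps using List.reverseRecOn with
  | nil => simp [pvM]
  | append_singleton ps x ih =>
    have hM : pvM (ps ++ [x]) = max (pvM ps) x.2 := by
      simp [pvM, List.foldl_append]
    rw [List.foldl_append, ih, List.foldl_cons, List.foldl_nil, hM]
    rcases lt_trichotomy (pvM ps) x.2 with hlt | heq | hgt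
    · have hmax : max (pvM ps) x.2 = x.2 := max_eq_right (le_of_lt hlt)
      have hnil : ps.filter (fun q => q.2 == x.2) = [] := by
        rw [List.filter_eq_nil_iff]
        intro q hq
        have hle : q.2 ≤ pvM ps := le_foldl_max_mem ps 0 q hq
        simp only [beq_iff_eq]
        omega
      simp [pvStep, hlt, hmax, hnil]
    · have hmax : max (pvM ps) x.2 = pvM ps := by omega
      simp [pvStep, ← heq, List.filter_append]
    · have hmax : max (pvM ps) x.2 = pvM ps := max_eq_left (le_of_lt hgt)
      have hne : (x.2 == pvM ps) = false := by simp; omega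
      simp [pvStep, hmax, not_lt.mpr (le_of_lt hgt), hne, List.filter_append]

-- max over the values of a nonempty nonnegative score list
theorem maxval (ps : List (String × Int)) (hne : ps ≠ []) (h0 : ∀ q ∈ ps, 0 ≤ q.2) :
    PySem.List.max? (ps.map (fun q => q.2)) (fun x => x) = some (pvM ps) := by
  cases ps with
  | nil => exact absurd rfl hne
  | cons p t =>
    rw [List.map_cons, PySem.List.max?_id_cons]
    have h0p : 0 ≤ p.2 := h0 p (by simp)
    have : pvM (p :: t) = t.foldl (fun m q => max m q.2) p.2 := by
      simp [pvM, max_eq_right h0p]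
    rw [this, List.foldl_map]

-- ===== VERDICT (by name: the statement is the Claim_ definition above) =====
theorem diagnose_spec : Claim_equal_diagnose := by
  intro l _
  show diagnose l = diagnose_alt l
  -- name B's per-disease score
  set scB : List String → Int :=
    fun syms => syms.foldl (fun acc s => acc + (PySem.List.count l s : Int)) (0 : Int) with hscB
  -- the list of (disease, score) pairs both programs are about
  set ps : List (String × Int) := knowledge_base.map (fun p => (p.1, scB p.2)) with hps
  have h0 : ∀ q ∈ ps, 0 ≤ q.2 := by
    intro q hq
    rw [hps] at hq
    rcases List.mem_map.mp hq with ⟨p, _, rfl⟩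
    rw [hscB]
    have : ∀ (syms : List String) (a : Int), a ≤ syms.foldl (fun acc s => acc + (PySem.List.count l s : Int)) a := by
      intro syms
      induction syms with
      | nil => intro a; simp
      | cons s t ih =>
        intro a
        exact le_trans (le_add_of_nonneg_right (by positivity)) (ih (a + (PySem.List.count l s : Int)))
    exact this p.2 0
  -- A side: the score dict's items are exactly ps
  have hitems :
      (knowledge_base.foldl (fun d p =>
        d.insert p.1 (l.foldl (fun acc s => if s ∈ p.2 then acc + 1 else acc) (0 : Int)))
        PySem.Dict.empty).items = ps := by
    rw [PySem.Dict.items_foldl_insert_fresh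
          (k := fun p => p.1)
          (v := fun p => l.foldl (fun acc s => if s ∈ p.2 then acc + 1 else acc) (0 : Int))
          (l := knowledge_base) (d := PySem.Dict.empty)
          (by intro a _; simp [PySem.Dict.contains_empty])
          (by decide)]
    rw [hps]
    simp only [show (PySem.Dict.empty : PySem.Dict String Int).items = [] from rfl, List.nil_append]
    apply List.map_congr_left
    intro p hp
    have hnd : p.2.Nodup := by
      have : ∀ q ∈ knowledge_base, q.2.Nodup := by decide
      exact this p hp
    rw [hscB, cnt_eq l p.2 hnd]
  -- B side: the fold is pvStep over ps
  have hB : diagnose_alt l =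
      (if (ps.foldl pvStep ([], 0)).2 > 1 then ps.foldl pvStep ([], 0) else ([], 0)) := by
    rw [diagnose_alt, hps, List.foldl_map]
    rfl
  have hne : ps ≠ [] := by rw [hps]; simp [knowledge_base]
  rw [diagnose, hB, fold_best]
  simp only [PySem.Dict.values, hitems, maxval ps hne h0]
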